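-- pv_equiv track=rewrite | github.com/jnoel01/CS_115 | HW2.py | helper
-- ===== SOURCE A (Python) =====
-- def helper(s1,s2,a):
--     if s1=='' or s2=='':
--         return []
--     if s1[0]==s2[0]:
--         a+=1
--         return [a] +helper(s1[1:], s2[1:],a)
--     else:
--         a += 1
--         return helper(s1[1:], s2, a)
-- ===== SOURCE B (Python) =====
-- def helper(s1, s2, a):
--     res = []
--     j = 0
--     n2 = len(s2)
--     for i, c in enumerate(s1):
--         if j >= n2:
--             break
--         if c == s2[j]:
--             res.append(a + i + 1)
--             j += 1
--     return res
-- ===== Notes on version B (the rewrite author's own statement) =====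
-- stated objective: faster
-- what changed: Replaced recursive string slicing (each step copies the string tails) by a single iterative index-based scan with a two-pointer cursor into s2, appending a+i+1 at matches.
import Mathlib
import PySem

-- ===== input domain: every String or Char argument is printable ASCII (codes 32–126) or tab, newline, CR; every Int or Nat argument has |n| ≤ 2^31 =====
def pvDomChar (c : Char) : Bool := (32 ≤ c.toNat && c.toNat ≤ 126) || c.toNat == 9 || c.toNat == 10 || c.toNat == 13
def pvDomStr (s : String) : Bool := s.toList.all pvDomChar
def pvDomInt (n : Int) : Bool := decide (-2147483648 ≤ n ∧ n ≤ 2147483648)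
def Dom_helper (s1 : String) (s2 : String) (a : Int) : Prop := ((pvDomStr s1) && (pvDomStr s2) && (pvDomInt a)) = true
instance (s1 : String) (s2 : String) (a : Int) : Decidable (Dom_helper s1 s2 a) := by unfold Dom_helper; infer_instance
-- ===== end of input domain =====

-- B replaces A's recursive string slicing by one iterative index-based two-pointer scan (objective: faster, asymptotic).

-- ===== PORT A =====
-- A recurses on the two strings, slicing off heads; ported as structural recursion on the char lists.
def helperRecA : List Char → List Char → Int → List Int
  | [], _, _ => []
  | _ :: _, [], _ => []
  | c1 :: t1, c2 :: t2, a =>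
    if c1 = c2 then (a + 1) :: helperRecA t1 t2 (a + 1)
    else helperRecA t1 (c2 :: t2) (a + 1)

def helper (s1 : String) (s2 : String) (a : Int) : List Int :=
  helperRecA s1.toList s2.toList a

-- ===== PORT B =====
-- B's loop: one pass over enumerate(s1) with a cursor j into s2; break when j reaches len(s2).
def helperLoopB (l2 : List Char) : List (Int × Char) → Nat → Int → List Int
  | [], _, _ => []
  | (i, c) :: rest, j, a =>
    if h : l2.length ≤ j then []
    else if c = l2[j]'(by omega) then (a + i + 1) :: helperLoopB l2 rest (j + 1) a
    else helperLoopB l2 rest j a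

def helper_alt (s1 : String) (s2 : String) (a : Int) : List Int :=
  helperLoopB s2.toList (PySem.List.enumerate s1.toList 0) 0 a

-- ===== PRECONDITION & SPEC =====
def Spec_helper (s1 : String) (s2 : String) (a : Int) (out : List Int) : Prop := out = helper_alt s1 s2 a
instance (s1 : String) (s2 : String) (a : Int) (out : List Int) : Decidable (Spec_helper s1 s2 a out) := by unfold Spec_helper; infer_instance

-- ===== CLAIM (what is proved, stated in full; the proofs are below) =====
def Claim_equal_helper : Prop := ∀ (s1 : String) (s2 : String) (a : Int), Dom_helper s1 s2 a → Spec_helper s1 s2 a (helper s1 s2 a)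

-- ===== LEMMAS AND PROOFS =====

theorem helperLoop_eq_rec (l1 l2 : List Char) :
    ∀ (j : Nat) (s a : Int), j ≤ l2.length →
      helperLoopB l2 (PySem.List.enumerate l1 s) j a = helperRecA l1 (l2.drop j) (a + s) := by
  induction l1 with
  | nil =>
    intro j s a _
    simp [PySem.List.enumerate_nil, helperLoopB]
    cases l2.drop j <;> simp [helperRecA]
  | cons c t1 ih =>
    intro j s a hj
    rw [PySem.List.enumerate_cons]
    by_cases h : l2.length ≤ j
    · have hdrop : l2.drop j = [] := List.drop_eq_nil_of_le h
      simp [helperLoopB, h, hdrop, helperRecA]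
    · have hlt : j < l2.length := by omega
      have hdrop : l2.drop j = l2[j] :: l2.drop (j + 1) := List.drop_eq_getElem_cons hlt
      rw [hdrop]
      by_cases hc : c = l2[j]
      · simp only [helperLoopB, dif_neg h, if_pos hc, helperRecA]
        rw [ih (j + 1) (s + 1) a (by omega)]
        ring_nf
      · simp only [helperLoopB, dif_neg h, if_neg hc, helperRecA]
        rw [ih j (s + 1) a (by omega), ← hdrop]
        ring_nf

-- ===== VERDICT (by name: the statement is the Claim_ definition above) =====
theorem helper_spec : Claim_equal_helper := by
  intro s1 s2 a _
  unfold Spec_helper helper helper_alt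
  rw [helperLoop_eq_rec s1.toList s2.toList 0 0 a (by omega)]
  simp
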